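-- pv_equiv track=rewrite | github.com/rileyshahar/botcbot | lib/utils.py | str_cleanup
-- ===== SOURCE A (Python) =====
-- from typing import Any, List, Tuple, TYPE_CHECKING
--
-- def str_cleanup(text: str, chars: Tuple[str] = (",", " ", "-", "'", "_")) -> str:
--     """Remove all instances of chars in str and capitalize the following letter."""
--     text_list = [text]
--     for char in chars:
--         temp_list = []
--         for x in text_list:
--             for y in x.split(char):
--                 temp_list.append(y)
--         text_list = temp_list
--     return "".join([x.capitalize() for x in text_list])
-- ===== SOURCE B (Python) =====
-- def str_cleanup(text: str, chars=(",", " ", "-", "'", "_")) -> str: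
--     """Remove all instances of chars in str and capitalize the following letter."""
--     marker = "\x00"
--     for char in chars:
--         text = text.replace(char, marker)
--     return "".join(frag.capitalize() for frag in text.split(marker))
-- ===== Notes on version B (the rewrite author's own statement) =====
-- stated objective: simpler
-- what changed: Instead of repeatedly rebuilding a list of fragments by splitting every fragment on each separator with nested Python loops, B overwrites every separator occurrence with a NUL sentinel character (impossible in the ASCII input domain) via str.replace and splits once at the end before capitalizing the fragments.
-- outside the precondition, e.g. on str_cleanup('ab', ('',)): A raises ValueError, B returns 'AB'
import Mathlib
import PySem

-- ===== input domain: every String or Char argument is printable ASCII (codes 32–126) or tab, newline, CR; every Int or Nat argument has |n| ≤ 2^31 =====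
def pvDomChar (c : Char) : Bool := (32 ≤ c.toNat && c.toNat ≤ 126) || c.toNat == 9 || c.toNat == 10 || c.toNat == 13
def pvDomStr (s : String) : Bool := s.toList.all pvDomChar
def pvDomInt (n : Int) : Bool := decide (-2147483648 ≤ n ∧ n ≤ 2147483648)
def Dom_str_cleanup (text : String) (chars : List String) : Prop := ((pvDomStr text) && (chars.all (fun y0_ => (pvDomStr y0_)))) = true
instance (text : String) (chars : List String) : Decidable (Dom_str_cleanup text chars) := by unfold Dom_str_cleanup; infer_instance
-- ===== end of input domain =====

-- B replaces A's repeated fragment-list rebuilding (split by each separator, nested loops) by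
-- overwriting every separator occurrence with a sentinel character and splitting once at the end;
-- objective: simpler (one string pass per separator, a single final split).

-- str.capitalize() on the ASCII domain: first char uppercased, the rest lowercased.
def pyCapitalize (cs : List Char) : List Char :=
  match cs with
  | [] => []
  | c :: rest => PySem.Chars.upperChar c :: PySem.Chars.lower rest

-- ===== PORT A =====
def str_cleanup (text : String) (chars : List String) : String :=
  -- text_list = [text]; for char in chars: temp_list = []; for x in text_list: for y in x.split(char): temp_list.append(y); text_list = temp_list
  let textList :=
    chars.foldl
      (fun textList char =>
        textList.foldl
          (fun tempList x => tempList ++ ((PySem.Chars.split? x char.toList).getD [x]))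
          [])
      [text.toList]
  -- "".join([x.capitalize() for x in text_list])   (split? = none marks Python's ValueError on an empty separator, outside Pre_)
  String.ofList (PySem.Chars.join [] (textList.map pyCapitalize))

-- ===== PORT B =====
def str_cleanup_alt (text : String) (chars : List String) : String :=
  -- marker = "\x00"; for char in chars: text = text.replace(char, marker)
  let t := chars.foldl (fun t char => PySem.Chars.replace t char.toList ['\x00']) text.toList
  -- "".join(frag.capitalize() for frag in text.split(marker))
  String.ofList (PySem.Chars.join [] ((PySem.Chars.splitOn t ['\x00']).map pyCapitalize))

-- ===== PRECONDITION & SPEC =====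
-- Pre_ excludes an empty-string separator in chars, on which A raises ValueError (str.split('')).
def Pre_str_cleanup (text : String) (chars : List String) : Prop := "" ∉ chars
instance (text : String) (chars : List String) : Decidable (Pre_str_cleanup text chars) := by
  unfold Pre_str_cleanup; infer_instance

def pvWitness_str_cleanup : String × List String := ("hello world,it's-me", [",", " ", "-", "'", "_"])

def Spec_str_cleanup (text : String) (chars : List String) (out : String) : Prop := out = str_cleanup_alt text chars
instance (text : String) (chars : List String) (out : String) : Decidable (Spec_str_cleanup text chars out) := by
  unfold Spec_str_cleanup; infer_instance

-- ===== CLAIM (what is proved, stated in full; the proofs are below) =====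
def Claim_equal_str_cleanup : Prop := ∀ (text : String) (chars : List String), Dom_str_cleanup text chars → Pre_str_cleanup text chars → Spec_str_cleanup text chars (str_cleanup text chars)

-- ===== LEMMAS AND PROOFS =====

-- A clean structural version of Python's str.split(sep) scan (sep ≠ [] guarded inside the if).
def split1 (sep : List Char) : List Char → List (List Char)
  | [] => [[]]
  | c :: rest =>
    if h : sep ≠ [] ∧ sep.isPrefixOf (c :: rest) then
      [] :: split1 sep ((c :: rest).drop sep.length)
    else
      (split1 sep rest).modifyHead (c :: ·)
termination_by l => l.length
decreasing_by
  · have h1 : 1 ≤ sep.length := by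
      cases sep with
      | nil => exact absurd rfl h.1
      | cons a s => simp
    simp only [List.length_drop, List.length_cons]
    omega
  · simp

-- A clean structural version of str.replace(sep, new).
def repl1 (sep new : List Char) : List Char → List Char
  | [] => []
  | c :: rest =>
    if h : sep ≠ [] ∧ sep.isPrefixOf (c :: rest) then
      new ++ repl1 sep new ((c :: rest).drop sep.length)
    else
      c :: repl1 sep new rest
termination_by l => l.length
decreasing_by
  · have h1 : 1 ≤ sep.length := by
      cases sep with
      | nil => exact absurd rfl h.1
      | cons a s => simp
    simp only [List.length_drop, List.length_cons]
    omega
  · simp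

theorem split1_ne_nil (sep l) : split1 sep l ≠ [] := by
  fun_induction split1 sep l with
  | case1 => simp
  | case2 c rest h ih => simp
  | case3 c rest h ih =>
    cases hs : split1 sep rest with
    | nil => exact absurd hs ih
    | cons a t => simp [List.modifyHead]

theorem splitOn_go_eq (sep : List Char) (hsep : sep ≠ []) :
    ∀ fuel l cur acc, l.length < fuel →
      PySem.Chars.splitOn.go sep fuel l cur acc
        = acc.reverse ++ ((split1 sep l).modifyHead (cur.reverse ++ ·)) := by
  intro fuel
  induction fuel using Nat.strong_induction_on with
  | _ fuel ih =>
    intro l cur acc hlt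
    match fuel, l with
    | 0, l => omega
    | fuel+1, [] =>
      simp [PySem.Chars.splitOn.go, split1]
    | fuel+1, c :: rest =>
      rw [PySem.Chars.splitOn.go]
      by_cases hp : sep.isPrefixOf (c :: rest)
      · have hlen : 1 ≤ sep.length := by
          cases sep with
          | nil => exact absurd rfl hsep
          | cons a s => simp
        have hdrop : ((c :: rest).drop sep.length).length < fuel := by
          simp only [List.length_drop, List.length_cons]
          simp only [List.length_cons] at hlt
          omega
        rw [if_pos hp, ih fuel (by omega) _ _ _ hdrop]
        rw [split1, dif_pos ⟨hsep, hp⟩]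
        cases hs : split1 sep ((c :: rest).drop sep.length) with
        | nil => exact absurd hs (split1_ne_nil _ _)
        | cons a t => simp [List.modifyHead]
      · have hrest : rest.length < fuel := by
          simp only [List.length_cons] at hlt; omega
        rw [if_neg hp, ih fuel (by omega) _ _ _ hrest]
        rw [split1, dif_neg (by simp [hp])]
        cases hs : split1 sep rest with
        | nil => exact absurd hs (split1_ne_nil _ _)
        | cons a t => simp [List.modifyHead]

theorem splitOn_eq_split1 (s sep : List Char) (h : sep ≠ []) :
    PySem.Chars.splitOn s sep = split1 sep s := by
  rw [PySem.Chars.splitOn, splitOn_go_eq sep h _ _ _ _ (by omega)]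
  cases hs : split1 sep s with
  | nil => exact absurd hs (split1_ne_nil _ _)
  | cons a t => simp [List.modifyHead]

theorem replace_go_eq (sep new : List Char) (hsep : sep ≠ []) :
    ∀ fuel l acc, l.length ≤ fuel →
      PySem.Chars.replace.go sep new fuel l acc = acc.reverse ++ repl1 sep new l := by
  intro fuel
  induction fuel using Nat.strong_induction_on with
  | _ fuel ih =>
    intro l acc hle
    match fuel, l with
    | 0, l =>
      have : l = [] := by
        cases l with
        | nil => rfl
        | cons a t => simp at hle
      subst this
      simp [PySem.Chars.replace.go, repl1]
    | fuel+1, [] =>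
      simp [PySem.Chars.replace.go, repl1]
    | fuel+1, c :: rest =>
      rw [PySem.Chars.replace.go]
      by_cases hp : sep.isPrefixOf (c :: rest)
      · have hlen : 1 ≤ sep.length := by
          cases sep with
          | nil => exact absurd rfl hsep
          | cons a s => simp
        have hdrop : ((c :: rest).drop sep.length).length ≤ fuel := by
          simp only [List.length_drop, List.length_cons]
          simp only [List.length_cons] at hle
          omega
        rw [if_pos hp, ih fuel (by omega) _ _ hdrop]
        rw [repl1, dif_pos ⟨hsep, hp⟩]
        simp
      · have hrest : rest.length ≤ fuel := by
          simp only [List.length_cons] at hle; omega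
        rw [if_neg hp, ih fuel (by omega) _ _ hrest]
        rw [repl1, dif_neg (by simp [hp])]
        simp

theorem replace_eq_repl1 (s sep new : List Char) (h : sep ≠ []) :
    PySem.Chars.replace s sep new = repl1 sep new s := by
  rw [PySem.Chars.replace, if_neg (by simpa using h), replace_go_eq sep new h _ _ _ (by omega)]
  simp

-- join s (x :: ys) expansion for nonempty tails
theorem join_cons_of_ne (s x : List Char) (ys : List (List Char)) (h : ys ≠ []) :
    PySem.Chars.join s (x :: ys) = x ++ s ++ PySem.Chars.join s ys := by
  cases ys with
  | nil => exact absurd rfl h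
  | cons a t => exact PySem.Chars.join_cons_cons ..

theorem join_append_of_ne (s : List Char) (xs ys : List (List Char)) (hx : xs ≠ []) (hy : ys ≠ []) :
    PySem.Chars.join s (xs ++ ys) = PySem.Chars.join s xs ++ s ++ PySem.Chars.join s ys := by
  induction xs with
  | nil => exact absurd rfl hx
  | cons a t ih =>
    cases t with
    | nil =>
      simp only [List.cons_append, List.nil_append]
      rw [join_cons_of_ne _ _ _ hy, PySem.Chars.join_singleton]
    | cons b u =>
      have ht : (b :: u) ≠ [] := by simp
      simp only [List.cons_append]
      rw [join_cons_of_ne _ _ _ (by simp), join_cons_of_ne _ _ _ ht,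
        show b :: (u ++ ys) = (b :: u) ++ ys from rfl, ih ht]
      simp [List.append_assoc]

theorem repl1_eq_join_split1 (sep new l : List Char) :
    repl1 sep new l = PySem.Chars.join new (split1 sep l) := by
  fun_induction repl1 sep new l with
  | case1 => rw [split1, PySem.Chars.join_singleton]
  | case2 c rest h ih =>
    rw [split1, dif_pos h, ih,
      join_cons_of_ne _ _ _ (split1_ne_nil _ _)]
    simp
  | case3 c rest h ih =>
    rw [split1, dif_neg h, ih]
    cases hs : split1 sep rest with
    | nil => exact absurd hs (split1_ne_nil _ _)
    | cons a t =>
      cases t with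
      | nil => simp [List.modifyHead, PySem.Chars.join_singleton]
      | cons b u =>
        simp only [List.modifyHead]
        rw [PySem.Chars.join_cons_cons, PySem.Chars.join_cons_cons]
        simp

-- matching a NUL-free pattern never crosses a NUL boundary
theorem isPrefixOf_append_nul (r : List Char) :
    ∀ (sep t : List Char), '\x00' ∉ sep →
      sep.isPrefixOf (t ++ '\x00' :: r) = sep.isPrefixOf t := by
  intro sep
  induction sep with
  | nil => intro t _; simp [List.isPrefixOf]
  | cons a ss ih =>
    intro t h
    cases t with
    | nil =>
      have ha : a ≠ '\x00' := fun he => h (by simp [he])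
      simp [List.isPrefixOf, beq_iff_eq, ha]
    | cons c t' =>
      simp only [List.cons_append, List.isPrefixOf]
      rw [ih t' (fun hm => h (List.mem_cons_of_mem _ hm))]

theorem repl1_append_nul_len (sep : List Char) (hs : sep ≠ []) (hn : '\x00' ∉ sep) :
    ∀ n, ∀ t : List Char, t.length ≤ n → ∀ r,
      repl1 sep ['\x00'] (t ++ '\x00' :: r)
        = repl1 sep ['\x00'] t ++ '\x00' :: repl1 sep ['\x00'] r := by
  have hnil : ∀ r, repl1 sep ['\x00'] ('\x00' :: r) = '\x00' :: repl1 sep ['\x00'] r := by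
    intro r
    have hp : sep.isPrefixOf ('\x00' :: r) = false := by
      cases sep with
      | nil => exact absurd rfl hs
      | cons a ss =>
        have : a ≠ '\x00' := fun he => hn (by simp [he])
        simp [List.isPrefixOf, beq_iff_eq, this]
    rw [repl1, dif_neg (by simp [hp])]
  have hznil : ∀ t : List Char, t = [] → ∀ r,
      repl1 sep ['\x00'] (t ++ '\x00' :: r)
        = repl1 sep ['\x00'] t ++ '\x00' :: repl1 sep ['\x00'] r := by
    intro t ht r
    subst ht
    rw [List.nil_append, hnil, repl1]
    simp
  intro n
  induction n with
  | zero =>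
    intro t hlen r
    exact hznil t (by cases t with | nil => rfl | cons a u => simp at hlen) r
  | succ n ih =>
    intro t hlen r
    cases t with
    | nil => exact hznil [] rfl r
    | cons c t' =>
      have hpeq : sep.isPrefixOf (c :: t' ++ '\x00' :: r) = sep.isPrefixOf (c :: t') :=
        isPrefixOf_append_nul r sep (c :: t') hn
      simp only [List.cons_append] at hpeq
      by_cases hp : sep.isPrefixOf (c :: t')
      · have hle : sep.length ≤ (c :: t').length :=
          (List.isPrefixOf_iff_prefix.mp hp).length_le
        have hdrop : (c :: (t' ++ '\x00' :: r)).drop sep.length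
            = (c :: t').drop sep.length ++ '\x00' :: r := by
          rw [show c :: (t' ++ '\x00' :: r) = (c :: t') ++ '\x00' :: r from rfl]
          exact List.drop_append_of_le_length hle
        have hlsep : 1 ≤ sep.length := by
          cases sep with
          | nil => exact absurd rfl hs
          | cons a u => simp
        have hdlen : ((c :: t').drop sep.length).length ≤ n := by
          simp only [List.length_drop, List.length_cons]
          simp only [List.length_cons] at hlen
          omega
        rw [List.cons_append, repl1, dif_pos ⟨hs, by rwa [hpeq]⟩, hdrop,
          ih _ hdlen r, repl1, dif_pos ⟨hs, hp⟩]
        simp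
      · have ht'len : t'.length ≤ n := by
          simp only [List.length_cons] at hlen; omega
        rw [List.cons_append, repl1, dif_neg (by simp [hpeq, hp]),
          ih t' ht'len r, repl1, dif_neg (by simp [hp])]
        simp

theorem repl1_append_nul (sep : List Char) (hs : sep ≠ []) (hn : '\x00' ∉ sep) :
    ∀ t r, repl1 sep ['\x00'] (t ++ '\x00' :: r)
      = repl1 sep ['\x00'] t ++ '\x00' :: repl1 sep ['\x00'] r :=
  fun t => repl1_append_nul_len sep hs hn t.length t le_rfl

theorem flatMap_split1_ne_nil (sep : List Char) (ts : List (List Char)) (h : ts ≠ []) :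
    ts.flatMap (fun x => split1 sep x) ≠ [] := by
  cases ts with
  | nil => exact absurd rfl h
  | cons t u =>
    simp only [List.flatMap_cons, ne_eq, List.append_eq_nil_iff, not_and]
    intro hnil
    exact absurd hnil (split1_ne_nil _ _)

theorem repl1_join (sep : List Char) (hs : sep ≠ []) (hn : '\x00' ∉ sep) :
    ∀ ts : List (List Char), ts ≠ [] →
      repl1 sep ['\x00'] (PySem.Chars.join ['\x00'] ts)
        = PySem.Chars.join ['\x00'] (ts.flatMap (fun x => split1 sep x)) := by
  intro ts
  induction ts with
  | nil => intro h; exact absurd rfl h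
  | cons t u ih =>
    intro _
    cases u with
    | nil =>
      simp only [PySem.Chars.join_singleton, List.flatMap_cons, List.flatMap_nil, List.append_nil]
      exact repl1_eq_join_split1 sep _ t
    | cons v w =>
      have hu : (v :: w) ≠ [] := by simp
      rw [join_cons_of_ne _ _ _ hu, List.append_assoc, List.singleton_append,
        repl1_append_nul sep hs hn, ih hu, repl1_eq_join_split1,
        show List.flatMap (fun x => split1 sep x) (t :: v :: w)
            = split1 sep t ++ List.flatMap (fun x => split1 sep x) (v :: w) from rfl,
        join_append_of_ne _ _ _ (split1_ne_nil _ _) (flatMap_split1_ne_nil sep (v :: w) hu),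
        List.append_assoc, List.singleton_append]

theorem split1_no_nul : ∀ t : List Char, '\x00' ∉ t → split1 ['\x00'] t = [t] := by
  intro t
  induction t with
  | nil => intro _; simp [split1]
  | cons c t' ih =>
    intro h
    have hc : c ≠ '\x00' := fun he => h (by simp [he])
    have hp : ¬ (['\x00'] : List Char).isPrefixOf (c :: t') := by
      simp [List.isPrefixOf, beq_iff_eq]
      exact fun he => absurd he.symm hc
    rw [split1, dif_neg (by simp [hp]), ih (fun hm => h (List.mem_cons_of_mem _ hm))]
    simp [List.modifyHead]

theorem split1_nul_cons (r : List Char) : ∀ t : List Char, '\x00' ∉ t →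
    split1 ['\x00'] (t ++ '\x00' :: r) = t :: split1 ['\x00'] r := by
  intro t
  induction t with
  | nil =>
    intro _
    rw [List.nil_append, split1, dif_pos (by simp [List.isPrefixOf])]
    simp
  | cons c t' ih =>
    intro h
    have hc : c ≠ '\x00' := fun he => h (by simp [he])
    have hp : ¬ (['\x00'] : List Char).isPrefixOf (c :: (t' ++ '\x00' :: r)) := by
      simp [List.isPrefixOf, beq_iff_eq]
      exact fun he => absurd he.symm hc
    rw [List.cons_append, split1, dif_neg (by simp [hp]),
      ih (fun hm => h (List.mem_cons_of_mem _ hm))]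
    simp [List.modifyHead]

theorem split1_nul_join (ts : List (List Char)) (h : ∀ t ∈ ts, '\x00' ∉ t) (hne : ts ≠ []) :
    split1 ['\x00'] (PySem.Chars.join ['\x00'] ts) = ts := by
  induction ts with
  | nil => exact absurd rfl hne
  | cons t u ih =>
    cases u with
    | nil =>
      rw [PySem.Chars.join_singleton, split1_no_nul t (h t (by simp))]
    | cons v w =>
      have hu : (v :: w) ≠ [] := by simp
      rw [join_cons_of_ne _ _ _ hu, List.append_assoc, List.singleton_append,
        split1_nul_cons _ _ (h t (by simp)),
        ih (fun x hx => h x (List.mem_cons_of_mem _ hx)) hu]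

theorem split1_mem (sep l : List Char) :
    ∀ t ∈ split1 sep l, ∀ c ∈ t, c ∈ l := by
  fun_induction split1 sep l with
  | case1 => intro t ht c hc; simp at ht; simp [ht] at hc
  | case2 c rest h ih =>
    intro t ht d hd
    rcases List.mem_cons.mp ht with he | hm
    · simp [he] at hd
    · exact List.mem_of_mem_drop (ih t hm d hd)
  | case3 c rest h ih =>
    intro t ht d hd
    cases hs : split1 sep rest with
    | nil => exact absurd hs (split1_ne_nil _ _)
    | cons a u =>
      rw [hs] at ih
      rw [hs, List.modifyHead] at ht
      rcases List.mem_cons.mp ht with he | hm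
      · subst he
        rcases List.mem_cons.mp hd with hdc | hda
        · simp [hdc]
        · exact List.mem_cons_of_mem _ (ih a (by simp) d hda)
      · exact List.mem_cons_of_mem _ (ih t (List.mem_cons_of_mem _ hm) d hd)

-- A-side fragment fold
def fragFold (seps : List (List Char)) (ts : List (List Char)) : List (List Char) :=
  seps.foldl (fun tl sep => tl.flatMap (fun x => split1 sep x)) ts

theorem fragFold_ne_nil (seps : List (List Char)) (ts : List (List Char)) (h : ts ≠ []) :
    fragFold seps ts ≠ [] := by
  induction seps generalizing ts with
  | nil => exact h
  | cons s ss ih => exact ih _ (flatMap_split1_ne_nil s ts h)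

theorem fragFold_mem (seps : List (List Char)) (ts : List (List Char)) :
    ∀ u ∈ fragFold seps ts, ∀ c ∈ u, ∃ t ∈ ts, c ∈ t := by
  induction seps generalizing ts with
  | nil => intro u hu c hc; exact ⟨u, hu, hc⟩
  | cons s ss ih =>
    intro u hu c hc
    obtain ⟨t, ht, hct⟩ := ih _ u hu c hc
    obtain ⟨x, hx, hsp⟩ := List.mem_flatMap.mp ht
    exact ⟨x, hx, split1_mem s x t hsp c hct⟩

theorem fold_replace_eq (seps : List (List Char))
    (h : ∀ sep ∈ seps, sep ≠ [] ∧ '\x00' ∉ sep) :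
    ∀ ts : List (List Char), ts ≠ [] →
      seps.foldl (fun t sep => PySem.Chars.replace t sep ['\x00']) (PySem.Chars.join ['\x00'] ts)
        = PySem.Chars.join ['\x00'] (fragFold seps ts) := by
  induction seps with
  | nil => intro ts _; rfl
  | cons s ss ih =>
    intro ts hne
    obtain ⟨hs, hn⟩ := h s (by simp)
    rw [List.foldl_cons, replace_eq_repl1 _ _ _ hs, repl1_join s hs hn ts hne,
      ih (fun sep hm => h sep (List.mem_cons_of_mem _ hm)) _ (flatMap_split1_ne_nil s ts hne)]
    rfl

-- ===== VERDICT (by name: the statement is the Claim_ definition above) =====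
theorem str_cleanup_spec : Claim_equal_str_cleanup := by
  intro text chars hdom hpre
  unfold Spec_str_cleanup str_cleanup str_cleanup_alt
  have hdom' := hdom
  unfold Dom_str_cleanup at hdom'
  simp only [Bool.and_eq_true, List.all_eq_true] at hdom'
  obtain ⟨htext, hchars⟩ := hdom'
  -- NUL is outside the domain
  have hnulchar : pvDomChar '\x00' = false := by decide
  have hnultext : '\x00' ∉ text.toList := by
    intro hm
    have := (List.all_eq_true.mp htext) _ hm
    rw [hnulchar] at this; cases this
  have hsep : ∀ s ∈ chars, s.toList ≠ [] ∧ '\x00' ∉ s.toList := by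
    intro s hs
    constructor
    · intro he
      apply hpre
      have hse : s = "" := by simp_all
      rwa [hse] at hs
    · intro hm
      have := (List.all_eq_true.mp (hchars s hs)) _ hm
      rw [hnulchar] at this; cases this
  -- rewrite A's inner loop (foldl-append over split?) into the flatMap of split1
  have hA : chars.foldl
      (fun textList char =>
        textList.foldl (fun tempList x => tempList ++ ((PySem.Chars.split? x char.toList).getD [x])) [])
      [text.toList]
      = fragFold (chars.map String.toList) [text.toList] := by
    unfold fragFold
    rw [List.foldl_map]
    apply PySem.List.foldl_congr_mem
    intro tl char hchar
    rw [PySem.List.foldl_append_eq_flatMap, List.nil_append]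
    apply List.flatMap_congr
    intro x _
    rw [PySem.Chars.split?, if_neg (by simpa using (hsep char hchar).1),
      Option.getD_some, splitOn_eq_split1 _ _ (hsep char hchar).1]
  -- rewrite B's fold into the joined fragments
  have hB : chars.foldl (fun t char => PySem.Chars.replace t char.toList ['\x00']) text.toList
      = PySem.Chars.join ['\x00'] (fragFold (chars.map String.toList) [text.toList]) := by
    have hfr := fold_replace_eq (chars.map String.toList)
      (by
        intro sep hm
        obtain ⟨sstr, hsm, he⟩ := List.mem_map.mp hm
        subst he
        exact hsep sstr hsm)
      [text.toList] (by simp)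
    rw [PySem.Chars.join_singleton, List.foldl_map] at hfr
    exact hfr
  -- fragments of the final list are NUL-free, and the list is nonempty
  have hmem : ∀ t ∈ fragFold (chars.map String.toList) [text.toList], '\x00' ∉ t := by
    intro t ht hc
    obtain ⟨u, hu, hcu⟩ := fragFold_mem _ _ t ht _ hc
    simp only [List.mem_singleton] at hu
    subst hu
    exact hnultext hcu
  have hne : fragFold (chars.map String.toList) [text.toList] ≠ [] :=
    fragFold_ne_nil _ _ (by simp)
  simp only []
  rw [hA, hB, splitOn_eq_split1 _ _ (by simp), split1_nul_join _ hmem hne]
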